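-- pv_equiv track=rewrite | github.com/RohdeK/adventofcode | archive/y2024/puzzles/day_02/solution_part_2.py | is_almost_safe
-- ===== SOURCE A (Python) =====
-- def is_almost_safe(report: list[int]) -> bool:
--     down_allowed_diff = (1, 2, 3)
--     up_allowed_diff = (-1, -2, -3)
--
--     diffs = [x0 - x1 for x0, x1 in zip(report[1:], report[:-1])]
--
--     if all(d in down_allowed_diff for d in diffs):
--         return True
--
--     elif all(d in up_allowed_diff for d in diffs):
--         return True
--
--     elif all(d in down_allowed_diff for d in diffs[1:]):
--         # Case first item is removed
--         return True
--
--     elif all(d in up_allowed_diff for d in diffs[1:]):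
--         # Case first item is removed
--         return True
--
--     elif all(d in down_allowed_diff for d in diffs[:-1]):
--         # Case last item is removed
--         return True
--
--     elif all(d in up_allowed_diff for d in diffs[:-1]):
--         # Case last item is removed
--         return True
--
--     else:
--         for idx in range(len(diffs) - 1):
--             almost = diffs.copy()
--             almost[idx + 1] += almost[idx]
--             del almost[idx]
--
--             if all(d in down_allowed_diff for d in almost):
--                 return True
--
--             elif all(d in up_allowed_diff for d in almost):
--                 return True
--
--         return False
-- ===== SOURCE B (Python) =====
-- def is_almost_safe(report: list[int]) -> bool:
--     def first_bad(r: list[int], lo: int, hi: int) -> int: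
--         # index of the first adjacent pair whose step is outside [lo, hi], or -1
--         for i in range(len(r) - 1):
--             if not (lo <= r[i + 1] - r[i] <= hi):
--                 return i
--         return -1
--
--     def almost(r: list[int], lo: int, hi: int) -> bool:
--         j = first_bad(r, lo, hi)
--         if j < 0:
--             return True
--         # only removing r[j] or r[j+1] can fix the first bad pair
--         return (first_bad(r[:j] + r[j + 1:], lo, hi) < 0
--                 or first_bad(r[:j + 1] + r[j + 2:], lo, hi) < 0)
--
--     return almost(report, 1, 3) or almost(report, -3, -1)
-- ===== Notes on version B (the rewrite author's own statement) =====
-- stated objective: faster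
-- what changed: B replaces A's scan over every removal position (rebuilding and rechecking the merged diff list each time) by a first-violation algorithm: per direction it finds the first bad adjacent pair once and only checks removal of its two endpoints, making the whole check linear.
import Mathlib
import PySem

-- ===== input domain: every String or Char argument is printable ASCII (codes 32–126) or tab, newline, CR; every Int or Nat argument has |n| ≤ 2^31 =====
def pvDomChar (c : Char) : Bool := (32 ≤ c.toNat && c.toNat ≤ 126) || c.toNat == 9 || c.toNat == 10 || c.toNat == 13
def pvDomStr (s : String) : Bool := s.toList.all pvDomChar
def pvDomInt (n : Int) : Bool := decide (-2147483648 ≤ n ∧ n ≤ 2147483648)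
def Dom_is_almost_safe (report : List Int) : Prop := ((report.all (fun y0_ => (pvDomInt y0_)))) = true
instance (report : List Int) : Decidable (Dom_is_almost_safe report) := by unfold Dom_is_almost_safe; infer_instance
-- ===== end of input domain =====

-- B replaces A's diff-merging scan over every removal position by an O(n) first-violation
-- algorithm: per direction, only removing one of the two elements of the first bad adjacent
-- pair can help, so at most two removal candidates are checked (objective: faster).

-- ===== PORT A =====
-- diffs = [x0 - x1 for x0, x1 in zip(report[1:], report[:-1])]
def pvDiffsA (report : List Int) : List Int :=
  ((PySem.List.slice report (some 1) none).zip (PySem.List.slice report none (some (-1)))).map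
    (fun p => p.1 - p.2)

-- d in (1, 2, 3) / d in (-1, -2, -3)
def pvInDown (d : Int) : Bool := ([1, 2, 3] : List Int).contains d
def pvInUp (d : Int) : Bool := ([-1, -2, -3] : List Int).contains d

-- the for-loop over idx in range(len(diffs) - 1); indices idx and idx+1 are in range
-- for every visited idx, so List.getD is exact here
def pvAlmost (diffs : List Int) (idx : Nat) : List Int :=
  (diffs.set (idx + 1) (diffs.getD (idx + 1) 0 + diffs.getD idx 0)).eraseIdx idx

def pvLoopA (diffs : List Int) : Bool :=
  (List.range (diffs.length - 1)).any (fun idx =>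
    (pvAlmost diffs idx).all pvInDown || (pvAlmost diffs idx).all pvInUp)

def is_almost_safe (report : List Int) : Bool :=
  let diffs := pvDiffsA report
  if diffs.all pvInDown then true
  else if diffs.all pvInUp then true
  else if (PySem.List.slice diffs (some 1) none).all pvInDown then true
  else if (PySem.List.slice diffs (some 1) none).all pvInUp then true
  else if (PySem.List.slice diffs none (some (-1))).all pvInDown then true
  else if (PySem.List.slice diffs none (some (-1))).all pvInUp then true
  else pvLoopA diffs

-- ===== PORT B =====
-- not (lo <= r[i+1] - r[i] <= hi) tested by the loop in first_bad; indices i, i+1 are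
-- always in range there, so List.getD is exact
def pvOkAt (r : List Int) (lo hi : Int) (i : Nat) : Bool :=
  decide (lo ≤ r.getD (i + 1) 0 - r.getD i 0) && decide (r.getD (i + 1) 0 - r.getD i 0 ≤ hi)

-- first_bad: first i with a bad adjacent step, else -1 (loop with early return = find?)
def pvFirstBad (r : List Int) (lo hi : Int) : Int :=
  match (List.range (r.length - 1)).find? (fun i => ! pvOkAt r lo hi i) with
  | some i => (i : Int)
  | none => -1

-- almost: j >= 0 below, so the slices r[:j]+r[j+1:] and r[:j+1]+r[j+2:] are exactly take/drop
def pvAlmostDir (r : List Int) (lo hi : Int) : Bool :=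
  let j := pvFirstBad r lo hi
  if j < 0 then true
  else
    pvFirstBad (r.take j.toNat ++ r.drop (j.toNat + 1)) lo hi < 0 ||
      pvFirstBad (r.take (j.toNat + 1) ++ r.drop (j.toNat + 1 + 1)) lo hi < 0

def is_almost_safe_alt (report : List Int) : Bool :=
  pvAlmostDir report 1 3 || pvAlmostDir report (-3) (-1)

-- ===== PRECONDITION & SPEC =====
def Spec_is_almost_safe (report : List Int) (out : Bool) : Prop := out = is_almost_safe_alt report
instance (report : List Int) (out : Bool) : Decidable (Spec_is_almost_safe report out) := by unfold Spec_is_almost_safe; infer_instance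

-- ===== CLAIM (what is proved, stated in full; the proofs are below) =====
def Claim_equal_is_almost_safe : Prop := ∀ (report : List Int), Dom_is_almost_safe report → Spec_is_almost_safe report (is_almost_safe report)

-- ===== LEMMAS AND PROOFS =====

-- B-style diffs and the classic per-direction safety predicate (proof-side helpers)
def pvDiffsB (r : List Int) : List Int := (r.zip (r.drop 1)).map (fun p => p.2 - p.1)

def pvSafeB (r : List Int) : Bool :=
  let ds := (r.zip (r.drop 1)).map (fun p => p.2 - p.1)
  ds.all (fun d => 1 ≤ d && d ≤ 3) || ds.all (fun d => -3 ≤ d && d ≤ -1)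

theorem pvDiffsB_cons_cons (a b : Int) (t : List Int) :
    pvDiffsB (a :: b :: t) = (b - a) :: pvDiffsB (b :: t) := by
  simp [pvDiffsB]

theorem pvDiffsA_eq (r : List Int) : pvDiffsA r = pvDiffsB r := by
  induction r with
  | nil => rfl
  | cons a t ih =>
    cases t with
    | nil => rfl
    | cons b t2 =>
      simp only [pvDiffsA, PySem.List.slice_from_one, PySem.List.slice_to_neg_one] at ih ⊢
      simp only [List.tail_cons, List.dropLast_cons₂, List.zip_cons_cons, List.map_cons,
        pvDiffsB_cons_cons]
      exact congrArg _ ih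

theorem pvDiffsB_tail (r : List Int) : (pvDiffsB r).tail = pvDiffsB r.tail := by
  cases r with
  | nil => rfl
  | cons a t => cases t with
    | nil => rfl
    | cons b t2 => simp [pvDiffsB]

theorem pvDiffsB_dropLast (r : List Int) : (pvDiffsB r).dropLast = pvDiffsB r.dropLast := by
  induction r with
  | nil => rfl
  | cons a t ih =>
    cases t with
    | nil => rfl
    | cons b t2 =>
      cases t2 with
      | nil => rfl
      | cons c t3 =>
        rw [pvDiffsB_cons_cons, List.dropLast_cons₂, List.dropLast_cons₂]
        have h2 : (b :: c :: t3).dropLast = b :: (c :: t3).dropLast := List.dropLast_cons₂ ..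
        rw [h2] at ih
        have hne : pvDiffsB (b :: c :: t3) ≠ [] := by simp [pvDiffsB]
        rw [List.dropLast_cons_of_ne_nil hne, ih]
        cases t3 with
        | nil => rfl
        | cons d t4 => simp only [List.dropLast_cons₂, pvDiffsB_cons_cons]

theorem pvMerge (r : List Int) (idx : Nat) (h : idx + 1 < (pvDiffsB r).length) :
    pvAlmost (pvDiffsB r) idx = pvDiffsB (r.eraseIdx (idx + 1)) := by
  unfold pvAlmost
  induction idx generalizing r with
  | zero =>
    match r with
    | a :: b :: c :: t => simp [pvDiffsB_cons_cons, List.eraseIdx]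
  | succ k ih =>
    match r with
    | a :: b :: t =>
      rw [pvDiffsB_cons_cons] at h ⊢
      simp only [List.length_cons] at h
      have h' : k + 1 < (pvDiffsB (b :: t)).length := by omega
      have := ih (b :: t) h'
      unfold pvAlmost at this
      simp only [List.getD_cons_succ, List.set_cons_succ, List.eraseIdx_cons_succ, this]
      rw [pvDiffsB_cons_cons]

-- membership in the allowed tuples as an interval
theorem pvInDown_eq (d : Int) : pvInDown d = (1 ≤ d && d ≤ 3) := by
  rw [Bool.eq_iff_iff]
  simp [pvInDown]
  omega

theorem pvInUp_eq (d : Int) : pvInUp d = (-3 ≤ d && d ≤ -1) := by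
  rw [Bool.eq_iff_iff]
  simp [pvInUp]
  omega

theorem pvSafeB_eq (r : List Int) :
    pvSafeB r = ((pvDiffsB r).all pvInDown || (pvDiffsB r).all pvInUp) := by
  simp only [pvSafeB, pvDiffsB]
  congr 1
  · exact congrArg _ (funext fun d => (pvInDown_eq d).symm)
  · exact congrArg _ (funext fun d => (pvInUp_eq d).symm)

-- removing one element via take/drop equals eraseIdx
theorem pvRemove_eq (r : List Int) (i : Nat) :
    r.take i ++ r.drop (i + 1) = r.eraseIdx i := (List.eraseIdx_eq_take_drop_succ r i).symm

-- characterization of B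
theorem pvDiffsB_getElem (r : List Int) (k : Nat) (h : k < (pvDiffsB r).length) :
    (pvDiffsB r)[k] =
      r[k + 1]'(by simp [pvDiffsB] at h; omega) - r[k]'(by simp [pvDiffsB] at h; omega) := by
  simp [pvDiffsB]

theorem pvAll_iff (r : List Int) (lo hi : Int) :
    ((pvDiffsB r).all (fun d => decide (lo ≤ d) && decide (d ≤ hi)) = true) ↔
      ∀ k, k + 1 < r.length → pvOkAt r lo hi k = true := by
  rw [List.all_eq_true, List.forall_mem_iff_getElem]
  have hlen : (pvDiffsB r).length = r.length - 1 := by simp [pvDiffsB]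
  constructor
  · intro h k hk
    have hk' : k < (pvDiffsB r).length := by omega
    have hh := h k hk'
    rw [pvDiffsB_getElem r k hk'] at hh
    unfold pvOkAt
    rw [List.getD_eq_getElem r 0 (by omega), List.getD_eq_getElem r 0 (by omega)]
    exact hh
  · intro h k hk
    rw [pvDiffsB_getElem r k hk]
    have hh := h k (by omega)
    unfold pvOkAt at hh
    rw [List.getD_eq_getElem r 0 (by omega), List.getD_eq_getElem r 0 (by omega)] at hh
    exact hh

theorem pvFirstBad_neg_iff (r : List Int) (lo hi : Int) :
    pvFirstBad r lo hi < 0 ↔ ∀ k, k + 1 < r.length → pvOkAt r lo hi k = true := by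
  unfold pvFirstBad
  cases hfind : (List.range (r.length - 1)).find? (fun i => ! pvOkAt r lo hi i) with
  | none =>
    have hall := List.find?_eq_none.mp hfind
    show (-1 : Int) < 0 ↔ _
    constructor
    · intro _ k hk
      have := hall k (List.mem_range.mpr (by omega))
      simpa using this
    · intro _; norm_num
  | some b =>
    obtain ⟨hp, i0, hi0, heq, _⟩ := List.find?_eq_some_iff_getElem.mp hfind
    rw [List.getElem_range] at heq
    subst heq
    simp only [List.length_range] at hi0
    show ((i0 : Int) < 0) ↔ _
    constructor
    · intro habs; exact absurd habs (by simp)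
    · intro hall
      exfalso
      have := hall i0 (by omega)
      simp [this] at hp

theorem pvFirstBad_spec (r : List Int) (lo hi : Int) (h : ¬ pvFirstBad r lo hi < 0) :
    (pvFirstBad r lo hi).toNat + 1 < r.length ∧
      pvOkAt r lo hi (pvFirstBad r lo hi).toNat = false := by
  unfold pvFirstBad at h ⊢
  cases hfind : (List.range (r.length - 1)).find? (fun i => ! pvOkAt r lo hi i) with
  | none => rw [hfind] at h; simp at h
  | some b =>
    obtain ⟨hp, i0, hi0, heq, _⟩ := List.find?_eq_some_iff_getElem.mp hfind
    rw [List.getElem_range] at heq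
    subst heq
    simp only [List.length_range] at hi0
    show ((i0 : Int)).toNat + 1 < r.length ∧ pvOkAt r lo hi ((i0 : Int)).toNat = false
    simp only [Int.toNat_natCast]
    exact ⟨by omega, by simpa using hp⟩

-- if the first bad pair is (j, j+1), removing any element other than r[j] or r[j+1]
-- leaves that bad pair adjacent
theorem pvSurvive (r : List Int) (lo hi : Int) (i j : Nat)
    (hj1 : j + 1 < r.length) (hbad : pvOkAt r lo hi j = false)
    (hilen : i < r.length) (hne1 : i ≠ j) (hne2 : i ≠ j + 1) :
    ∃ k, k + 1 < (r.eraseIdx i).length ∧ pvOkAt (r.eraseIdx i) lo hi k = false := by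
  have hlen : (r.eraseIdx i).length = r.length - 1 := by
    rw [List.length_eraseIdx]; simp [hilen]
  unfold pvOkAt at hbad
  rw [List.getD_eq_getElem r 0 (by omega), List.getD_eq_getElem r 0 (by omega)] at hbad
  rcases Nat.lt_or_ge i j with hij | hij
  · refine ⟨j - 1, by omega, ?_⟩
    unfold pvOkAt
    rw [show j - 1 + 1 = j from by omega]
    rw [List.getD_eq_getElem _ 0 (by omega), List.getD_eq_getElem _ 0 (by omega)]
    rw [List.getElem_eraseIdx_of_ge (by omega) (by omega),
      List.getElem_eraseIdx_of_ge (by omega) (by omega)]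
    simp only [show j - 1 + 1 = j from by omega]
    exact hbad
  · have hij' : j + 1 < i := by omega
    refine ⟨j, by omega, ?_⟩
    unfold pvOkAt
    rw [List.getD_eq_getElem _ 0 (by omega), List.getD_eq_getElem _ 0 (by omega)]
    rw [List.getElem_eraseIdx_of_lt (by omega) (by omega),
      List.getElem_eraseIdx_of_lt (by omega) (by omega)]
    exact hbad

theorem pvAlmostDir_iff (r : List Int) (lo hi : Int) :
    pvAlmostDir r lo hi = true ↔
      ((∀ k, k + 1 < r.length → pvOkAt r lo hi k = true) ∨
        ∃ i < r.length, ∀ k, k + 1 < (r.eraseIdx i).length →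
          pvOkAt (r.eraseIdx i) lo hi k = true) := by
  by_cases hneg : pvFirstBad r lo hi < 0
  · constructor
    · intro _
      exact Or.inl ((pvFirstBad_neg_iff r lo hi).mp hneg)
    · intro _
      simp [pvAlmostDir, hneg]
  · obtain ⟨hj1, hbad⟩ := pvFirstBad_spec r lo hi hneg
    have hL : pvAlmostDir r lo hi =
        (decide (pvFirstBad (r.eraseIdx (pvFirstBad r lo hi).toNat) lo hi < 0) ||
          decide (pvFirstBad (r.eraseIdx ((pvFirstBad r lo hi).toNat + 1)) lo hi < 0)) := by
      simp only [pvAlmostDir]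
      rw [if_neg hneg, pvRemove_eq, pvRemove_eq]
    rw [hL]
    simp only [Bool.or_eq_true, decide_eq_true_eq, pvFirstBad_neg_iff]
    constructor
    · rintro (h | h)
      · exact Or.inr ⟨(pvFirstBad r lo hi).toNat, by omega, h⟩
      · exact Or.inr ⟨(pvFirstBad r lo hi).toNat + 1, by omega, h⟩
    · rintro (h | ⟨i, hilt, hok⟩)
      · exact absurd (h _ hj1) (by simp [hbad])
      · by_cases e1 : i = (pvFirstBad r lo hi).toNat
        · subst e1; exact Or.inl hok
        · by_cases e2 : i = (pvFirstBad r lo hi).toNat + 1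
          · subst e2; exact Or.inr hok
          · obtain ⟨k, hk, hkbad⟩ := pvSurvive r lo hi i _ hj1 hbad hilt e1 e2
            exact absurd (hok k hk) (by simp [hkbad])

theorem altB_iff (r : List Int) :
    is_almost_safe_alt r = true ↔
      pvSafeB r = true ∨ ∃ i < r.length, pvSafeB (r.eraseIdx i) = true := by
  have hs : ∀ l : List Int, pvSafeB l = true ↔
      ((∀ k, k + 1 < l.length → pvOkAt l 1 3 k = true) ∨
        (∀ k, k + 1 < l.length → pvOkAt l (-3) (-1) k = true)) := by
    intro l
    rw [show pvSafeB l =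
        ((pvDiffsB l).all (fun d => decide ((1 : Int) ≤ d) && decide (d ≤ 3)) ||
          (pvDiffsB l).all (fun d => decide ((-3 : Int) ≤ d) && decide (d ≤ -1))) from rfl]
    rw [Bool.or_eq_true, pvAll_iff, pvAll_iff]
  simp only [is_almost_safe_alt, Bool.or_eq_true]
  rw [pvAlmostDir_iff, pvAlmostDir_iff]
  constructor
  · rintro ((h | ⟨i, hi, h⟩) | (h | ⟨i, hi, h⟩))
    · exact Or.inl ((hs r).mpr (Or.inl h))
    · exact Or.inr ⟨i, hi, (hs _).mpr (Or.inl h)⟩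
    · exact Or.inl ((hs r).mpr (Or.inr h))
    · exact Or.inr ⟨i, hi, (hs _).mpr (Or.inr h)⟩
  · rintro (h | ⟨i, hi, h⟩)
    · rcases (hs r).mp h with h | h
      · exact Or.inl (Or.inl h)
      · exact Or.inr (Or.inl h)
    · rcases (hs _).mp h with h | h
      · exact Or.inl (Or.inr ⟨i, hi, h⟩)
      · exact Or.inr (Or.inr ⟨i, hi, h⟩)

-- characterization of A
theorem portA_iff (r : List Int) :
    is_almost_safe r = true ↔
      pvSafeB r = true ∨ ∃ i < r.length, pvSafeB (r.eraseIdx i) = true := by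
  have hd : pvDiffsA r = pvDiffsB r := pvDiffsA_eq r
  have hlen : (pvDiffsB r).length = r.length - 1 := by
    simp [pvDiffsB, List.length_zip]
  simp only [is_almost_safe, hd, PySem.List.slice_from_one, PySem.List.slice_to_neg_one]
  constructor
  · intro h
    split_ifs at h with h1 h2 h3 h4 h5 h6
    · exact Or.inl (by rw [pvSafeB_eq, h1, Bool.true_or])
    · exact Or.inl (by rw [pvSafeB_eq, h2, Bool.or_true])
    · -- remove first element; if r = [] then safe r is true anyway
      cases r with
      | nil => exact Or.inl (by decide)
      | cons a t =>
        refine Or.inr ⟨0, by simp, ?_⟩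
        rw [List.eraseIdx_zero, pvSafeB_eq, List.tail_cons]
        rw [show pvDiffsB t = (pvDiffsB (a :: t)).tail by rw [pvDiffsB_tail]; rfl]
        rw [h3, Bool.true_or]
    · cases r with
      | nil => exact Or.inl (by decide)
      | cons a t =>
        refine Or.inr ⟨0, by simp, ?_⟩
        rw [List.eraseIdx_zero, pvSafeB_eq, List.tail_cons]
        rw [show pvDiffsB t = (pvDiffsB (a :: t)).tail by rw [pvDiffsB_tail]; rfl]
        rw [h4, Bool.or_true]
    · -- remove last element
      cases r with
      | nil => exact Or.inl (by decide)
      | cons a t =>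
        refine Or.inr ⟨(a :: t).length - 1, by simp, ?_⟩
        rw [List.eraseIdx_length_sub_one, pvSafeB_eq, ← pvDiffsB_dropLast, h5,
          Bool.true_or]
    · cases r with
      | nil => exact Or.inl (by decide)
      | cons a t =>
        refine Or.inr ⟨(a :: t).length - 1, by simp, ?_⟩
        rw [List.eraseIdx_length_sub_one, pvSafeB_eq, ← pvDiffsB_dropLast, h6,
          Bool.or_true]
    · -- the loop
      simp only [pvLoopA, List.any_eq_true, List.mem_range] at h
      obtain ⟨idx, hidx, hsafe⟩ := h
      refine Or.inr ⟨idx + 1, by omega, ?_⟩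
      rw [pvSafeB_eq, ← pvMerge r idx (by omega)]
      exact hsafe
  · rintro (h | ⟨i, hi, hs⟩)
    · rw [pvSafeB_eq, Bool.or_eq_true] at h
      split_ifs <;> simp_all
    · rw [pvSafeB_eq, Bool.or_eq_true] at hs
      by_cases hn : r.length ≤ 1
      · -- tiny report: diffs is empty, first branch fires
        have : pvDiffsB r = [] := List.eq_nil_of_length_eq_zero (by omega)
        simp [this]
      · rcases Nat.eq_zero_or_pos i with rfl | hipos
        · -- removal of the first element ↔ branch on diffs.tail
          have ht : pvDiffsB (r.eraseIdx 0) = (pvDiffsB r).tail := by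
            rw [pvDiffsB_tail, List.eraseIdx_zero]
          rw [ht] at hs
          split_ifs <;> simp_all
        · obtain ⟨j, rfl⟩ : ∃ j, i = j + 1 := ⟨i - 1, by omega⟩
          rcases Nat.lt_or_ge (j + 1) (r.length - 1) with hmid | hlast
          · -- a middle removal: the loop at idx = j
            have hloop : pvLoopA (pvDiffsB r) = true := by
              simp only [pvLoopA, List.any_eq_true, List.mem_range]
              refine ⟨j, by omega, ?_⟩
              rw [pvMerge r j (by omega), Bool.or_eq_true]
              exact hs
            split_ifs <;> simp_all
          · -- removal of the last element ↔ branch on diffs.dropLast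
            have hi' : j + 1 = r.length - 1 := by omega
            have ht : pvDiffsB (r.eraseIdx (j + 1)) = (pvDiffsB r).dropLast := by
              rw [hi', List.eraseIdx_length_sub_one, pvDiffsB_dropLast]
            rw [ht] at hs
            split_ifs <;> simp_all

-- ===== VERDICT (by name: the statement is the Claim_ definition above) =====
theorem is_almost_safe_spec : Claim_equal_is_almost_safe := by
  intro report _
  unfold Spec_is_almost_safe
  have := (portA_iff report).trans (altB_iff report).symm
  cases hA : is_almost_safe report <;> cases hB : is_almost_safe_alt report <;> simp_all
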